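-- pv_equiv track=rewrite | github.com/rocabrera2000-bot/plasmid_blast | identify_plasmid_groups_v2.py | subtract_intervals
-- ===== SOURCE A (Python) =====
-- from typing import Dict, List, Set, Tuple
--
-- def merge_intervals(iv: List[Tuple[int,int]]) -> List[Tuple[int,int]]:
--     if not iv: return []
--     iv = sorted((min(a,b), max(a,b)) for a,b in iv)
--     out = []
--     s, e = iv[0]
--     for a, b in iv[1:]:
--         if a <= e + 1:
--             e = max(e, b)
--         else:
--             out.append((s, e))
--             s, e = a, b
--     out.append((s, e))
--     return out
--
-- def subtract_intervals(a: List[Tuple[int,int]], b: List[Tuple[int,int]]) -> List[Tuple[int,int]]: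
--     """Return a - b (parts of a not covered by b)."""
--     a = merge_intervals(a); b = merge_intervals(b)
--     out = []
--     j = 0
--     for s, e in a:
--         cur = s
--         while j < len(b) and b[j][1] < cur:
--             j += 1
--         k = j
--         while k < len(b) and b[k][0] <= e:
--             if b[k][0] > cur:
--                 out.append((cur, b[k][0]-1))
--             cur = max(cur, b[k][1] + 1)
--             k += 1
--         if cur <= e:
--             out.append((cur, e))
--     return out
-- ===== SOURCE B (Python) =====
-- def subtract_intervals(a, b):
--     """Return a - b (parts of a not covered by b)."""
--     nb = [(min(x, y), max(x, y)) for x, y in b]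
--     pieces = []
--     for x, y in a:
--         segs = [(min(x, y), max(x, y))]
--         for bs, be in nb:
--             nxt = []
--             for s, e in segs:
--                 if s <= min(e, bs - 1):
--                     nxt.append((s, min(e, bs - 1)))
--                 if max(s, be + 1) <= e:
--                     nxt.append((max(s, be + 1), e))
--             segs = nxt
--         pieces.extend(segs)
--     out = []
--     for s, e in sorted(pieces):
--         if out and s <= out[-1][1] + 1:
--             out[-1] = (out[-1][0], max(out[-1][1], e))
--         else:
--             out.append((s, e))
--     return out
-- ===== Notes on version B (the rewrite author's own statement) =====
-- stated objective: alternative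
-- what changed: A merges both lists up front and then walks merged a with a persistent b index plus an inner gap scan; B never pre-merges or coordinates pointers: it clips each a-interval by every b-interval independently (interval difference per pair), collects all pieces, and canonicalizes once with a final sort-and-merge pass.
import Mathlib
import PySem

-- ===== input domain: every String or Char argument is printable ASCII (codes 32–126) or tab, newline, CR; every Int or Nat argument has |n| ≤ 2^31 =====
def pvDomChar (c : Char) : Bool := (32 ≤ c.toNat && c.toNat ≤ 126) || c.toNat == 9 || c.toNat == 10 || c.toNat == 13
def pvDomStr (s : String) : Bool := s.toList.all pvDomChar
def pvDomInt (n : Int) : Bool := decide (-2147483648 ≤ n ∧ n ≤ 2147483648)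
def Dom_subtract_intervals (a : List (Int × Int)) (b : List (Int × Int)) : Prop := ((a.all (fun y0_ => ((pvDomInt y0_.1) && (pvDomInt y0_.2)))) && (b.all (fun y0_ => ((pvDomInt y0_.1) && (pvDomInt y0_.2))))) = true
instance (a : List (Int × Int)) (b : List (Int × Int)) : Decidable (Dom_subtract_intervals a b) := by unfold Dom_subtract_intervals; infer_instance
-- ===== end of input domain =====

-- B drops A's up-front merging of both lists and its coordinated pointer walk entirely: it clips
-- each a-interval by every b-interval independently and canonicalizes the pieces with one final
-- sort-and-merge pass; objective: alternative.

-- ===== PORT A =====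

-- merge_intervals: sorted((min,max) pairs), then a fold carrying (out, s, e); the [] check on iv
-- is rendered as the [] case of the sorted list (sorted of [] is [] and conversely).
def pvMergeA (iv : List (Int × Int)) : List (Int × Int) :=
  match PySem.List.sorted2 (iv.map (fun p => (min p.1 p.2, max p.1 p.2))) Prod.fst Prod.snd with
  | [] => []
  | (s, e) :: rest =>
    let r := rest.foldl (fun (st : List (Int × Int) × Int × Int) (p : Int × Int) =>
      if p.1 ≤ st.2.2 + 1 then (st.1, st.2.1, max st.2.2 p.2)
      else (st.1 ++ [(st.2.1, st.2.2)], p.1, p.2)) ([], s, e)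
    r.1 ++ [(r.2.1, r.2.2)]

-- the 'while j < len(b) and b[j][1] < cur: j += 1' loop, on the suffix b[j:]
def pvSkipW : List (Int × Int) → Int → List (Int × Int)
  | [], _ => []
  | (bs, be) :: r, cur => if be < cur then pvSkipW r cur else (bs, be) :: r

-- the 'while k < len(b) and b[k][0] <= e: …' loop, on the suffix b[k:]; returns (cur, out)
def pvInnerW : List (Int × Int) → Int → Int → List (Int × Int) → Int × List (Int × Int)
  | [], _, cur, out => (cur, out)
  | (bs, be) :: r, e, cur, out =>
    if bs ≤ e then
      pvInnerW r e (max cur (be + 1)) (if bs > cur then out ++ [(cur, bs - 1)] else out)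
    else (cur, out)

def subtract_intervals (a : List (Int × Int)) (b : List (Int × Int)) : List (Int × Int) :=
  let ma := pvMergeA a
  let mb := pvMergeA b
  (ma.foldl (fun (st : List (Int × Int) × List (Int × Int)) (p : Int × Int) =>
      let b1 := pvSkipW st.2 p.1
      let r := pvInnerW b1 p.2 p.1 st.1
      (if r.1 ≤ p.2 then r.2 ++ [(r.1, p.2)] else r.2, b1)) ([], mb)).1

-- ===== PORT B =====

-- the inner 'for s, e in segs' loop of Source B: clip one segment by one b-interval (≤ 2 pieces)
def pvClip1 (q : Int × Int) (p : Int × Int) : List (Int × Int) :=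
  (if p.1 ≤ min p.2 (q.1 - 1) then [(p.1, min p.2 (q.1 - 1))] else []) ++
  (if max p.1 (q.2 + 1) ≤ p.2 then [(max p.1 (q.2 + 1), p.2)] else [])

-- the 'for bs, be in nb' loop: clip a segment list by every b-interval in turn
def pvClipAll (nb : List (Int × Int)) (seg : Int × Int) : List (Int × Int) :=
  nb.foldl (fun segs q => segs.flatMap (pvClip1 q)) [seg]

-- Source B's final pass: sort the pieces, then the stack merge mutating out[-1]
-- (the Python list 'out' is kept reversed here: out[-1] = head).
def pvMergeEnd (pieces : List (Int × Int)) : List (Int × Int) :=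
  ((PySem.List.sorted2 pieces Prod.fst Prod.snd).foldl
    (fun acc (p : Int × Int) =>
      match acc with
      | [] => [p]
      | (s, e) :: rest => if p.1 ≤ e + 1 then (s, max e p.2) :: rest else p :: (s, e) :: rest)
    []).reverse

def subtract_intervals_alt (a : List (Int × Int)) (b : List (Int × Int)) : List (Int × Int) :=
  let nb := b.map (fun p => (min p.1 p.2, max p.1 p.2))
  let pieces := a.flatMap (fun p => pvClipAll nb (min p.1 p.2, max p.1 p.2))
  pvMergeEnd pieces

-- ===== PRECONDITION & SPEC =====
def Spec_subtract_intervals (a : List (Int × Int)) (b : List (Int × Int)) (out : List (Int × Int)) : Prop := out = subtract_intervals_alt a b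
instance (a : List (Int × Int)) (b : List (Int × Int)) (out : List (Int × Int)) : Decidable (Spec_subtract_intervals a b out) := by unfold Spec_subtract_intervals; infer_instance

-- ===== CLAIM (what is proved, stated in full; the proofs are below) =====
def Claim_equal_subtract_intervals : Prop := ∀ (a : List (Int × Int)) (b : List (Int × Int)), Dom_subtract_intervals a b → Spec_subtract_intervals a b (subtract_intervals a b)

-- ===== LEMMAS AND PROOFS =====

-- integer coverage of a list of inclusive intervals
def pvCov (l : List (Int × Int)) (x : Int) : Prop := ∃ p ∈ l, p.1 ≤ x ∧ x ≤ p.2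

theorem pv_cov_nil (x : Int) : ¬ pvCov [] x := by simp [pvCov]

theorem pv_cov_cons (s e : Int) (t : List (Int × Int)) (x : Int) :
    pvCov ((s, e) :: t) x ↔ (s ≤ x ∧ x ≤ e) ∨ pvCov t x := by
  simp [pvCov]

theorem pv_cov_append (l1 l2 : List (Int × Int)) (x : Int) :
    pvCov (l1 ++ l2) x ↔ pvCov l1 x ∨ pvCov l2 x := by
  simp [pvCov, or_and_right, exists_or]

theorem pv_cov_perm {l1 l2 : List (Int × Int)} (h : l1.Perm l2) (x : Int) :
    pvCov l1 x ↔ pvCov l2 x := by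
  unfold pvCov
  constructor <;> rintro ⟨p, hp, h1, h2⟩
  · exact ⟨p, h.mem_iff.mp hp, h1, h2⟩
  · exact ⟨p, h.mem_iff.mpr hp, h1, h2⟩

-- merged lists: each interval nonempty, gaps of at least 2 between consecutive intervals
def pvChainI (l : List (Int × Int)) : Prop :=
  (∀ p ∈ l, p.1 ≤ p.2) ∧ l.IsChain (fun p q => p.2 + 1 < q.1)

theorem pv_chain_tail {p : Int × Int} {t : List (Int × Int)} (h : pvChainI (p :: t)) :
    pvChainI t :=
  ⟨fun q hq => h.1 q (List.mem_cons_of_mem _ hq), h.2.tail⟩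

theorem pv_chain_lb (t : List (Int × Int)) : ∀ s e : Int, pvChainI ((s, e) :: t) →
    ∀ q ∈ t, e + 1 < q.1 := by
  induction t with
  | nil => intro s e _ q hq; simp at hq
  | cons p t' ih =>
    intro s e h q hq
    obtain ⟨s', e'⟩ := p
    have h1 : e + 1 < s' := (List.isChain_cons_cons.mp h.2).1
    have h2 : s' ≤ e' := h.1 (s', e') (List.mem_cons_of_mem _ List.mem_cons_self)
    rcases List.mem_cons.mp hq with rfl | hq
    · exact h1
    · have := ih s' e' (pv_chain_tail h) q hq
      omega

theorem pv_cov_lb {s e x : Int} {t : List (Int × Int)} (h : pvChainI ((s, e) :: t))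
    (hc : pvCov ((s, e) :: t) x) : s ≤ x := by
  rcases (pv_cov_cons s e t x).mp hc with h1 | ⟨q, hq, h1, h2⟩
  · exact h1.1
  · have h3 := pv_chain_lb t s e h q hq
    have h4 : s ≤ e := h.1 (s, e) List.mem_cons_self
    omega

theorem pv_cov_gap {s e : Int} {t : List (Int × Int)} (h : pvChainI ((s, e) :: t)) :
    ¬ pvCov ((s, e) :: t) (e + 1) := by
  intro hc
  rcases (pv_cov_cons s e t (e + 1)).mp hc with h1 | ⟨q, hq, h1, h2⟩
  · omega
  · have := pv_chain_lb t s e h q hq; omega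

theorem pv_cov_tail_iff {s e x : Int} {t : List (Int × Int)} (h : pvChainI ((s, e) :: t)) :
    pvCov t x ↔ pvCov ((s, e) :: t) x ∧ e + 2 ≤ x := by
  constructor
  · rintro ⟨q, hq, h1, h2⟩
    have := pv_chain_lb t s e h q hq
    exact ⟨(pv_cov_cons s e t x).mpr (Or.inr ⟨q, hq, h1, h2⟩), by omega⟩
  · rintro ⟨hc, hx⟩
    rcases (pv_cov_cons s e t x).mp hc with h1 | h1
    · omega
    · exact h1

-- chains are determined by their coverage
theorem pv_chain_unique (l1 : List (Int × Int)) : ∀ l2, pvChainI l1 → pvChainI l2 →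
    (∀ x, pvCov l1 x ↔ pvCov l2 x) → l1 = l2 := by
  induction l1 with
  | nil =>
    intro l2 _ h2 hcov
    cases l2 with
    | nil => rfl
    | cons p t =>
      obtain ⟨s, e⟩ := p
      have hse : s ≤ e := h2.1 (s, e) List.mem_cons_self
      have : pvCov ((s, e) :: t) s := (pv_cov_cons s e t s).mpr (Or.inl ⟨le_refl s, hse⟩)
      exact absurd ((hcov s).mpr this) (pv_cov_nil s)
  | cons p t ih =>
    intro l2 h1 h2 hcov
    obtain ⟨s, e⟩ := p
    have hse : s ≤ e := h1.1 (s, e) List.mem_cons_self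
    cases l2 with
    | nil =>
      have : pvCov ((s, e) :: t) s := (pv_cov_cons s e t s).mpr (Or.inl ⟨le_refl s, hse⟩)
      exact absurd ((hcov s).mp this) (pv_cov_nil s)
    | cons q t2 =>
      obtain ⟨s2, e2⟩ := q
      have hse2 : s2 ≤ e2 := h2.1 (s2, e2) List.mem_cons_self
      have hc1 : pvCov ((s, e) :: t) s := (pv_cov_cons s e t s).mpr (Or.inl ⟨le_refl s, hse⟩)
      have hc2 : pvCov ((s2, e2) :: t2) s2 := (pv_cov_cons s2 e2 t2 s2).mpr (Or.inl ⟨le_refl s2, hse2⟩)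
      have hs1 : s2 ≤ s := pv_cov_lb h2 ((hcov s).mp hc1)
      have hs2 : s ≤ s2 := pv_cov_lb h1 ((hcov s2).mpr hc2)
      have hs : s = s2 := le_antisymm hs2 hs1
      have he : e = e2 := by
        by_contra hne
        rcases lt_or_gt_of_ne hne with hlt | hgt
        · have : pvCov ((s2, e2) :: t2) (e + 1) :=
            (pv_cov_cons s2 e2 t2 (e + 1)).mpr (Or.inl ⟨by omega, by omega⟩)
          exact pv_cov_gap h1 ((hcov (e + 1)).mpr this)
        · have : pvCov ((s, e) :: t) (e2 + 1) :=
            (pv_cov_cons s e t (e2 + 1)).mpr (Or.inl ⟨by omega, by omega⟩)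
          exact pv_cov_gap h2 ((hcov (e2 + 1)).mp this)
      subst hs; subst he
      have : t = t2 := by
        refine ih t2 (pv_chain_tail h1) (pv_chain_tail h2) (fun x => ?_)
        rw [pv_cov_tail_iff h1, pv_cov_tail_iff h2, hcov x]
      rw [this]

-- ---------- sortedness of sorted2 ----------

theorem pv_insertBy_pairwise {R : (Int × Int) → (Int × Int) → Prop} {before : (Int × Int) → (Int × Int) → Bool}
    (htrans : ∀ a b c, R a b → R b c → R a c)
    (ht : ∀ a b, before a b = true → R a b) (hf : ∀ a b, before a b = false → R b a)
    (x : Int × Int) (ys : List (Int × Int)) (h : ys.Pairwise R) :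
    (PySem.List.insertBy before x ys).Pairwise R := by
  induction ys with
  | nil => simp [PySem.List.insertBy]
  | cons y ys ih =>
    rcases List.pairwise_cons.mp h with ⟨hy, hys⟩
    by_cases hb : before x y = true
    · simp only [PySem.List.insertBy, hb, if_true]
      refine List.pairwise_cons.mpr ⟨?_, h⟩
      intro z hz
      rcases List.mem_cons.mp hz with rfl | hz
      · exact ht _ _ hb
      · exact htrans _ _ _ (ht _ _ hb) (hy _ hz)
    · simp only [PySem.List.insertBy, hb]
      refine List.pairwise_cons.mpr ⟨?_, ih hys⟩
      intro z hz
      rcases (PySem.List.mem_insertBy before x z ys).mp hz with rfl | hz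
      · exact hf _ _ (Bool.eq_false_iff.mpr hb ▸ rfl)
      · exact hy _ hz

theorem pv_foldl_insertBy_pairwise {R : (Int × Int) → (Int × Int) → Prop}
    {before : (Int × Int) → (Int × Int) → Bool}
    (htrans : ∀ a b c, R a b → R b c → R a c)
    (ht : ∀ a b, before a b = true → R a b) (hf : ∀ a b, before a b = false → R b a)
    (xs : List (Int × Int)) : ∀ acc, acc.Pairwise R →
    (xs.foldl (fun acc x => PySem.List.insertBy before x acc) acc).Pairwise R := by
  induction xs with
  | nil => intro acc h; exact h
  | cons x xs ih => intro acc h; exact ih _ (pv_insertBy_pairwise htrans ht hf x acc h)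

theorem pv_sorted2_pairwise_fst (xs : List (Int × Int)) :
    (PySem.List.sorted2 xs Prod.fst Prod.snd false).Pairwise (fun p q => p.1 ≤ q.1) := by
  show (xs.foldl (fun acc x => PySem.List.insertBy
    (fun a b => decide (a.1 < b.1) || (!decide (b.1 < a.1) && decide (a.2 < b.2))) x acc) []).Pairwise _
  refine pv_foldl_insertBy_pairwise (fun a b c => by omega) ?_ ?_ xs [] List.Pairwise.nil
  · intro a b hb; simp at hb; omega
  · intro a b hb; simp at hb; omega

-- ---------- the common merge core ----------

def pvMergeRec (s e : Int) : List (Int × Int) → List (Int × Int)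
  | [] => [(s, e)]
  | (x, y) :: r => if x ≤ e + 1 then pvMergeRec s (max e y) r else (s, e) :: pvMergeRec x y r

def pvMergeCore (xs : List (Int × Int)) : List (Int × Int) :=
  match PySem.List.sorted2 xs Prod.fst Prod.snd with
  | [] => []
  | (s, e) :: rest => pvMergeRec s e rest

-- A's merge fold equals pvMergeRec
theorem pv_mergeA_fold (rest : List (Int × Int)) : ∀ (out : List (Int × Int)) (s e : Int),
    (let r := rest.foldl (fun (st : List (Int × Int) × Int × Int) (p : Int × Int) =>
      if p.1 ≤ st.2.2 + 1 then (st.1, st.2.1, max st.2.2 p.2)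
      else (st.1 ++ [(st.2.1, st.2.2)], p.1, p.2)) (out, s, e)
     r.1 ++ [(r.2.1, r.2.2)]) = out ++ pvMergeRec s e rest := by
  induction rest with
  | nil => intro out s e; simp [pvMergeRec]
  | cons p r ih =>
    intro out s e
    obtain ⟨x, y⟩ := p
    simp only [List.foldl_cons, pvMergeRec]
    by_cases h : x ≤ e + 1
    · simpa [h] using ih out s (max e y)
    · simpa [h] using ih (out ++ [(s, e)]) x y

-- B's final merge fold equals pvMergeRec
theorem pv_mergeEnd_fold (rest : List (Int × Int)) : ∀ (acc : List (Int × Int)) (s e : Int),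
    ((rest.foldl (fun acc (p : Int × Int) =>
      match acc with
      | [] => [p]
      | (s, e) :: rest => if p.1 ≤ e + 1 then (s, max e p.2) :: rest else p :: (s, e) :: rest)
      ((s, e) :: acc)).reverse) = acc.reverse ++ pvMergeRec s e rest := by
  induction rest with
  | nil => intro acc s e; simp [pvMergeRec]
  | cons p r ih =>
    intro acc s e
    obtain ⟨x, y⟩ := p
    simp only [List.foldl_cons, pvMergeRec]
    by_cases h : x ≤ e + 1
    · simpa [h] using ih acc s (max e y)
    · simpa [h] using ih ((s, e) :: acc) x y

theorem pv_mergeA_eq_core (iv : List (Int × Int)) :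
    pvMergeA iv = pvMergeCore (iv.map (fun p => (min p.1 p.2, max p.1 p.2))) := by
  unfold pvMergeA pvMergeCore
  cases h : PySem.List.sorted2 (iv.map (fun p => (min p.1 p.2, max p.1 p.2))) Prod.fst Prod.snd with
  | nil => simp
  | cons p rest =>
    obtain ⟨s, e⟩ := p
    simpa using pv_mergeA_fold rest [] s e

theorem pv_mergeEnd_eq_core (ps : List (Int × Int)) : pvMergeEnd ps = pvMergeCore ps := by
  unfold pvMergeEnd pvMergeCore
  cases h : PySem.List.sorted2 ps Prod.fst Prod.snd with
  | nil => simp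
  | cons p rest =>
    obtain ⟨s, e⟩ := p
    simpa using pv_mergeEnd_fold rest [] s e

theorem pv_mergeRec_head (rest : List (Int × Int)) : ∀ s e : Int,
    ∃ e' t, pvMergeRec s e rest = (s, e') :: t := by
  induction rest with
  | nil => intro s e; exact ⟨e, [], rfl⟩
  | cons p r ih =>
    intro s e
    obtain ⟨x, y⟩ := p
    by_cases h : x ≤ e + 1
    · simpa [pvMergeRec, h] using ih s (max e y)
    · exact ⟨e, pvMergeRec x y r, by simp [pvMergeRec, h]⟩

theorem pv_mergeRec_chain (rest : List (Int × Int)) : ∀ s e : Int, s ≤ e →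
    (∀ p ∈ rest, p.1 ≤ p.2) → (∀ p ∈ rest, s ≤ p.1) →
    rest.Pairwise (fun p q => p.1 ≤ q.1) → pvChainI (pvMergeRec s e rest) := by
  induction rest with
  | nil =>
    intro s e hse _ _ _
    refine ⟨?_, by constructor⟩
    intro p hp
    have : p = (s, e) := by simpa [pvMergeRec] using hp
    simp [this, hse]
  | cons p r ih =>
    intro s e hse hne hge hpw
    obtain ⟨x, y⟩ := p
    rcases List.pairwise_cons.mp hpw with ⟨hx, hr⟩
    by_cases h : x ≤ e + 1
    · rw [pvMergeRec, if_pos h]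
      exact ih s (max e y) (le_max_of_le_left hse)
        (fun q hq => hne q (List.mem_cons_of_mem _ hq))
        (fun q hq => hge q (List.mem_cons_of_mem _ hq)) hr
    · rw [pvMergeRec, if_neg h]
      have hxy : x ≤ y := hne (x, y) List.mem_cons_self
      have hchain := ih x y hxy (fun q hq => hne q (List.mem_cons_of_mem _ hq)) hx hr
      obtain ⟨e', t, ht⟩ := pv_mergeRec_head r x y
      refine ⟨?_, ?_⟩
      · intro q hq
        rcases List.mem_cons.mp hq with rfl | hq
        · exact hse
        · exact hchain.1 q hq
      · rw [ht]
        rw [ht] at hchain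
        exact List.isChain_cons_cons.mpr ⟨by omega, hchain.2⟩

theorem pv_mergeRec_cov (rest : List (Int × Int)) : ∀ (s e x : Int),
    (∀ q ∈ rest, s ≤ q.1) → rest.Pairwise (fun p q => p.1 ≤ q.1) →
    (pvCov (pvMergeRec s e rest) x ↔ (s ≤ x ∧ x ≤ e) ∨ pvCov rest x) := by
  induction rest with
  | nil => intro s e x _ _; simp [pvMergeRec, pvCov]
  | cons p r ih =>
    intro s e x hge hpw
    obtain ⟨x0, y⟩ := p
    rcases List.pairwise_cons.mp hpw with ⟨hx0, hr⟩
    have hs0 : s ≤ x0 := hge (x0, y) List.mem_cons_self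
    by_cases h : x0 ≤ e + 1
    · rw [pvMergeRec, if_pos h,
        ih s (max e y) x (fun q hq => hge q (List.mem_cons_of_mem _ hq)) hr,
        pv_cov_cons]
      constructor
      · rintro (h1 | h1)
        · by_cases h2 : x ≤ e
          · exact Or.inl ⟨h1.1, h2⟩
          · exact Or.inr (Or.inl ⟨by omega, by omega⟩)
        · exact Or.inr (Or.inr h1)
      · rintro (h1 | h1 | h1)
        · exact Or.inl ⟨h1.1, by omega⟩
        · exact Or.inl ⟨by omega, by omega⟩
        · exact Or.inr h1
    · rw [pvMergeRec, if_neg h, pv_cov_cons,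
        ih x0 y x hx0 hr, pv_cov_cons]

theorem pv_sorted2_perm' (xs : List (Int × Int)) :
    (PySem.List.sorted2 xs Prod.fst Prod.snd).Perm xs :=
  PySem.List.sorted2_perm xs Prod.fst Prod.snd false

theorem pv_mergeCore_cov (xs : List (Int × Int)) (x : Int) :
    pvCov (pvMergeCore xs) x ↔ pvCov xs x := by
  unfold pvMergeCore
  have hperm := pv_sorted2_perm' xs
  have hpw := pv_sorted2_pairwise_fst xs
  cases h : PySem.List.sorted2 xs Prod.fst Prod.snd with
  | nil =>
    rw [h] at hperm
    rw [← pv_cov_perm hperm x]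
  | cons p rest =>
    obtain ⟨s, e⟩ := p
    rw [h] at hperm hpw
    rcases List.pairwise_cons.mp hpw with ⟨hge, hr⟩
    rw [pv_mergeRec_cov rest s e x hge hr, ← pv_cov_perm hperm x, pv_cov_cons]

theorem pv_mergeCore_chain (xs : List (Int × Int)) (hne : ∀ p ∈ xs, p.1 ≤ p.2) :
    pvChainI (pvMergeCore xs) := by
  unfold pvMergeCore
  have hperm := pv_sorted2_perm' xs
  have hpw := pv_sorted2_pairwise_fst xs
  cases h : PySem.List.sorted2 xs Prod.fst Prod.snd with
  | nil => exact ⟨by simp, List.isChain_nil⟩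
  | cons p rest =>
    obtain ⟨s, e⟩ := p
    rw [h] at hperm hpw
    rcases List.pairwise_cons.mp hpw with ⟨hge, hr⟩
    have hmem : ∀ p ∈ (s, e) :: rest, p.1 ≤ p.2 := fun p hp => hne p (hperm.mem_iff.mp hp)
    exact pv_mergeRec_chain rest s e (hmem (s, e) List.mem_cons_self)
      (fun q hq => hmem q (List.mem_cons_of_mem _ hq)) hge hr

-- ---------- A's main loop, in recursive form ----------

def pvArec : List (Int × Int) → List (Int × Int) → List (Int × Int) → List (Int × Int)
  | [], _, out => out
  | (s, e) :: as_, bsuf, out =>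
    let b1 := pvSkipW bsuf s
    let r := pvInnerW b1 e s out
    pvArec as_ b1 (if r.1 ≤ e then r.2 ++ [(r.1, e)] else r.2)

theorem pv_foldl_eq_arec (ma : List (Int × Int)) : ∀ (bsuf out : List (Int × Int)),
    (ma.foldl (fun (st : List (Int × Int) × List (Int × Int)) (p : Int × Int) =>
      let b1 := pvSkipW st.2 p.1
      let r := pvInnerW b1 p.2 p.1 st.1
      (if r.1 ≤ p.2 then r.2 ++ [(r.1, p.2)] else r.2, b1)) (out, bsuf)).1
    = pvArec ma bsuf out := by
  induction ma with
  | nil => intro bsuf out; rfl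
  | cons p as_ ih =>
    intro bsuf out
    obtain ⟨s, e⟩ := p
    simp only [List.foldl_cons, pvArec]
    exact ih _ _

-- ---------- pvSkipW ----------

theorem pv_skip_chain (bsuf : List (Int × Int)) : ∀ c, pvChainI bsuf →
    pvChainI (pvSkipW bsuf c) := by
  induction bsuf with
  | nil => intro c _; rw [pvSkipW]; exact ⟨by simp, List.isChain_nil⟩
  | cons p r ih =>
    intro c h
    obtain ⟨bs, be⟩ := p
    by_cases hb : be < c
    · rw [pvSkipW, if_pos hb]; exact ih c (pv_chain_tail h)
    · rw [pvSkipW, if_neg hb]; exact h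

theorem pv_skip_snd_ge (bsuf : List (Int × Int)) : ∀ c, pvChainI bsuf →
    ∀ q ∈ pvSkipW bsuf c, c ≤ q.2 := by
  induction bsuf with
  | nil => intro c _ q hq; simp [pvSkipW] at hq
  | cons p r ih =>
    intro c h q hq
    obtain ⟨bs, be⟩ := p
    by_cases hb : be < c
    · rw [pvSkipW, if_pos hb] at hq; exact ih c (pv_chain_tail h) q hq
    · rw [pvSkipW, if_neg hb] at hq
      rcases List.mem_cons.mp hq with rfl | hq
      · omega
      · have h1 := pv_chain_lb r bs be h q hq
        have h2 : q.1 ≤ q.2 := h.1 q (List.mem_cons_of_mem _ hq)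
        omega

theorem pv_skip_cov (bsuf : List (Int × Int)) : ∀ (c x : Int), c ≤ x →
    (pvCov (pvSkipW bsuf c) x ↔ pvCov bsuf x) := by
  induction bsuf with
  | nil => intro c x _; simp [pvSkipW]
  | cons p r ih =>
    intro c x hcx
    obtain ⟨bs, be⟩ := p
    by_cases hb : be < c
    · rw [pvSkipW, if_pos hb, ih c x hcx, pv_cov_cons]
      constructor
      · exact Or.inr
      · rintro (h1 | h1)
        · omega
        · exact h1
    · rw [pvSkipW, if_neg hb]

-- ---------- pvInnerW and the per-interval piece list ----------

theorem pv_innerW_out (l : List (Int × Int)) : ∀ (e cur : Int) (o : List (Int × Int)),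
    pvInnerW l e cur o = ((pvInnerW l e cur []).1, o ++ (pvInnerW l e cur []).2) := by
  induction l with
  | nil => intro e cur o; simp [pvInnerW]
  | cons p r ih =>
    intro e cur o
    obtain ⟨bs, be⟩ := p
    by_cases h : bs ≤ e
    · rw [pvInnerW, if_pos h, pvInnerW, if_pos h]
      rw [ih e (max cur (be + 1)) (if bs > cur then o ++ [(cur, bs - 1)] else o),
        ih e (max cur (be + 1)) (if bs > cur then ([] : List (Int × Int)) ++ [(cur, bs - 1)] else [])]
      by_cases hc : bs > cur <;> simp [hc]
    · rw [pvInnerW, if_neg h, pvInnerW, if_neg h]; simp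

def pvF (b1 : List (Int × Int)) (e cur : Int) : List (Int × Int) :=
  if (pvInnerW b1 e cur []).1 ≤ e then (pvInnerW b1 e cur []).2 ++ [((pvInnerW b1 e cur []).1, e)]
  else (pvInnerW b1 e cur []).2

theorem pv_F_nil (e cur : Int) : pvF [] e cur = if cur ≤ e then [(cur, e)] else [] := by
  by_cases h : cur ≤ e <;> simp [pvF, pvInnerW, h]

theorem pv_F_cons (bs be e cur : Int) (r : List (Int × Int)) (h : bs ≤ e) :
    pvF ((bs, be) :: r) e cur
      = (if bs > cur then [(cur, bs - 1)] else []) ++ pvF r e (max cur (be + 1)) := by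
  unfold pvF
  rw [pvInnerW, if_pos h, pv_innerW_out r e (max cur (be + 1))]
  by_cases hc : bs > cur <;> by_cases h2 : (pvInnerW r e (max cur (be + 1)) []).1 ≤ e <;>
    simp [hc, h2]

theorem pv_F_stop (bs be e cur : Int) (r : List (Int × Int)) (h : ¬ bs ≤ e) :
    pvF ((bs, be) :: r) e cur = if cur ≤ e then [(cur, e)] else [] := by
  by_cases h2 : cur ≤ e <;> simp [pvF, pvInnerW, h, h2]

theorem pv_F_main (b1 : List (Int × Int)) : ∀ (e cur : Int), pvChainI b1 →
    (∀ q ∈ b1, cur ≤ q.2) →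
    (∀ x, pvCov (pvF b1 e cur) x ↔ (cur ≤ x ∧ x ≤ e ∧ ¬ pvCov b1 x)) ∧
    pvChainI (pvF b1 e cur) ∧ (∀ p ∈ pvF b1 e cur, cur ≤ p.1 ∧ p.2 ≤ e) := by
  induction b1 with
  | nil =>
    intro e cur _ _
    rw [pv_F_nil]
    by_cases h : cur ≤ e
    · rw [if_pos h]
      refine ⟨fun x => ?_, ?_, ?_⟩
      · rw [pv_cov_cons]
        constructor
        · rintro (⟨h1, h2⟩ | h1)
          · exact ⟨h1, h2, pv_cov_nil x⟩
          · exact absurd h1 (pv_cov_nil x)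
        · rintro ⟨h1, h2, _⟩
          exact Or.inl ⟨h1, h2⟩
      · refine ⟨?_, by simp⟩
        intro p hp
        rcases List.mem_singleton.mp hp with rfl
        exact h
      · intro p hp
        rcases List.mem_singleton.mp hp with rfl
        exact ⟨le_refl _, le_refl _⟩
    · rw [if_neg h]
      refine ⟨fun x => ?_, ⟨by simp, List.isChain_nil⟩, by simp⟩
      constructor
      · intro h1
        exact absurd h1 (pv_cov_nil x)
      · rintro ⟨h1, h2, _⟩
        exact absurd (le_trans h1 h2) h
  | cons p r ih =>
    intro e cur hch hcur
    obtain ⟨bs, be⟩ := p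
    have hbsbe : bs ≤ be := hch.1 (bs, be) List.mem_cons_self
    have hlb := pv_chain_lb r bs be hch
    have hcurbe : cur ≤ be := hcur (bs, be) List.mem_cons_self
    by_cases h : bs ≤ e
    · rw [pv_F_cons bs be e cur r h]
      have hcur' : ∀ q ∈ r, max cur (be + 1) ≤ q.2 := by
        intro q hq
        have h1 := hlb q hq
        have h2 : q.1 ≤ q.2 := hch.1 q (List.mem_cons_of_mem _ hq)
        omega
      obtain ⟨hcov, hchain, hbnd⟩ := ih e (max cur (be + 1)) (pv_chain_tail hch) hcur'
      by_cases hc : bs > cur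
      · rw [if_pos hc]
        refine ⟨fun x => ?_, ?_, ?_⟩
        · rw [pv_cov_append, hcov x, pv_cov_cons, pv_cov_cons]
          constructor
          · rintro ((⟨h1, h2⟩ | h1) | ⟨h1, h2, h3⟩)
            · refine ⟨h1, by omega, ?_⟩
              rintro (⟨h4, h5⟩ | h4)
              · omega
              · rcases h4 with ⟨q, hq, h5, h6⟩
                have := hlb q hq
                omega
            · exact absurd h1 (pv_cov_nil x)
            · refine ⟨by omega, h2, ?_⟩
              rintro (h4 | h4)
              · omega
              · exact h3 h4
          · rintro ⟨h1, h2, h3⟩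
            by_cases h4 : x < bs
            · exact Or.inl (Or.inl ⟨h1, by omega⟩)
            · have h5 : ¬ (bs ≤ x ∧ x ≤ be) := fun h6 => h3 (Or.inl h6)
              exact Or.inr ⟨by omega, h2, fun h6 => h3 (Or.inr h6)⟩
        · refine ⟨?_, ?_⟩
          · intro q hq
            rcases List.mem_append.mp hq with h1 | h1
            · rcases List.mem_singleton.mp h1 with rfl
              simp only
              omega
            · exact hchain.1 q h1
          · refine List.IsChain.append ?_ hchain.2 ?_
            · simp
            · intro p hp q hq
              rcases List.mem_singleton.mp (List.mem_of_mem_getLast? hp) with rfl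
              have := (hbnd q (List.mem_of_mem_head? hq)).1
              simp only
              omega
        · intro q hq
          rcases List.mem_append.mp hq with h1 | h1
          · rcases List.mem_singleton.mp h1 with rfl
            refine ⟨le_refl _, ?_⟩
            simp only
            omega
          · have := hbnd q h1
            omega
      · rw [if_neg hc, List.nil_append]
        refine ⟨fun x => ?_, hchain, ?_⟩
        · rw [hcov x, pv_cov_cons]
          constructor
          · rintro ⟨h1, h2, h3⟩
            refine ⟨by omega, h2, ?_⟩
            rintro (h4 | h4)
            · omega
            · exact h3 h4
          · rintro ⟨h1, h2, h3⟩
            have h5 : ¬ (bs ≤ x ∧ x ≤ be) := fun h6 => h3 (Or.inl h6)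
            exact ⟨by omega, h2, fun h4 => h3 (Or.inr h4)⟩
        · intro q hq
          have := hbnd q hq
          omega
    · rw [pv_F_stop bs be e cur r h]
      have hnb : ∀ x, x ≤ e → ¬ pvCov ((bs, be) :: r) x := by
        intro x hx hc
        rcases (pv_cov_cons bs be r x).mp hc with ⟨h1, h2⟩ | ⟨q, hq, h1, h2⟩
        · omega
        · have := hlb q hq
          omega
      by_cases h2 : cur ≤ e
      · rw [if_pos h2]
        refine ⟨fun x => ?_, ?_, ?_⟩
        · rw [pv_cov_cons]
          constructor
          · rintro (⟨h3, h4⟩ | h3)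
            · exact ⟨h3, h4, hnb x h4⟩
            · exact absurd h3 (pv_cov_nil x)
          · rintro ⟨h3, h4, _⟩
            exact Or.inl ⟨h3, h4⟩
        · refine ⟨?_, by simp⟩
          intro p hp
          rcases List.mem_singleton.mp hp with rfl
          exact h2
        · intro p hp
          rcases List.mem_singleton.mp hp with rfl
          exact ⟨le_refl _, le_refl _⟩
      · rw [if_neg h2]
        refine ⟨fun x => ?_, ⟨by simp, List.isChain_nil⟩, by simp⟩
        constructor
        · intro h1
          exact absurd h1 (pv_cov_nil x)
        · rintro ⟨h3, h4, _⟩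
          exact absurd (le_trans h3 h4) h2


-- ---------- pvArec: out-threading and the main characterization ----------

theorem pv_arec_out (ma : List (Int × Int)) : ∀ (bsuf out : List (Int × Int)),
    pvArec ma bsuf out = out ++ pvArec ma bsuf [] := by
  induction ma with
  | nil => intro bsuf out; simp [pvArec]
  | cons p as_ ih =>
    intro bsuf out
    obtain ⟨s, e⟩ := p
    simp only [pvArec]
    rw [pv_innerW_out (pvSkipW bsuf s) e s out]
    by_cases h : (pvInnerW (pvSkipW bsuf s) e s []).1 ≤ e
    · simp only [h, if_pos]
      rw [ih (pvSkipW bsuf s) (out ++ (pvInnerW (pvSkipW bsuf s) e s []).2 ++ [((pvInnerW (pvSkipW bsuf s) e s []).1, e)]),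
        ih (pvSkipW bsuf s) ((pvInnerW (pvSkipW bsuf s) e s []).2 ++ [((pvInnerW (pvSkipW bsuf s) e s []).1, e)])]
      simp
    · simp only [h, if_neg, not_false_iff]
      rw [ih (pvSkipW bsuf s) (out ++ (pvInnerW (pvSkipW bsuf s) e s []).2),
        ih (pvSkipW bsuf s) ((pvInnerW (pvSkipW bsuf s) e s []).2)]
      simp

theorem pv_arec_step (s e : Int) (as_ bsuf : List (Int × Int)) :
    pvArec ((s, e) :: as_) bsuf [] = pvF (pvSkipW bsuf s) e s ++ pvArec as_ (pvSkipW bsuf s) [] := by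
  simp only [pvArec]
  rw [pv_innerW_out (pvSkipW bsuf s) e s []]
  unfold pvF
  by_cases h : (pvInnerW (pvSkipW bsuf s) e s []).1 ≤ e <;>
    simp only [h, if_pos, if_neg, not_false_iff, List.nil_append] <;>
    rw [pv_arec_out]

theorem pv_arec_main (ma : List (Int × Int)) : ∀ bsuf, pvChainI ma → pvChainI bsuf →
    (∀ x, pvCov (pvArec ma bsuf []) x ↔ pvCov ma x ∧ ¬ pvCov bsuf x) ∧
    pvChainI (pvArec ma bsuf []) := by
  induction ma with
  | nil =>
    intro bsuf _ _
    refine ⟨fun x => ?_, ⟨by simp [pvArec], by simp [pvArec]⟩⟩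
    simp [pvArec, pvCov]
  | cons p as_ ih =>
    intro bsuf hca hcb
    obtain ⟨s, e⟩ := p
    have hse : s ≤ e := hca.1 (s, e) List.mem_cons_self
    have halb := pv_chain_lb as_ s e hca
    have hb1c : pvChainI (pvSkipW bsuf s) := pv_skip_chain bsuf s hcb
    have hb1ge : ∀ q ∈ pvSkipW bsuf s, s ≤ q.2 := pv_skip_snd_ge bsuf s hcb
    obtain ⟨hFcov, hFchain, hFbnd⟩ := pv_F_main (pvSkipW bsuf s) e s hb1c hb1ge
    obtain ⟨hTcov, hTchain⟩ := ih (pvSkipW bsuf s) (pv_chain_tail hca) hb1c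
    rw [pv_arec_step]
    constructor
    · intro x
      rw [pv_cov_append, hFcov x, hTcov x, pv_cov_cons]
      constructor
      · rintro (⟨h1, h2, h3⟩ | ⟨h1, h2⟩)
        · refine ⟨Or.inl ⟨h1, h2⟩, ?_⟩
          intro h4
          exact h3 ((pv_skip_cov bsuf s x h1).mpr h4)
        · have hx : s ≤ x := by
            rcases h1 with ⟨q, hq, h3, h4⟩
            have := halb q hq
            omega
          exact ⟨Or.inr h1, fun h4 => h2 ((pv_skip_cov bsuf s x hx).mpr h4)⟩
      · rintro ⟨h1 | h1, h2⟩
        · exact Or.inl ⟨h1.1, h1.2, fun h3 => h2 ((pv_skip_cov bsuf s x h1.1).mp h3)⟩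
        · have hx : s ≤ x := by
            rcases h1 with ⟨q, hq, h3, h4⟩
            have := halb q hq
            omega
          exact Or.inr ⟨h1, fun h3 => h2 ((pv_skip_cov bsuf s x hx).mp h3)⟩
    · refine ⟨?_, ?_⟩
      · intro q hq
        rcases List.mem_append.mp hq with h1 | h1
        · exact hFchain.1 q h1
        · exact hTchain.1 q h1
      · refine List.IsChain.append hFchain.2 hTchain.2 ?_
        intro p hp q hq
        have hpF := List.mem_of_mem_getLast? hp
        have hqT := List.mem_of_mem_head? hq
        have h1 : p.2 ≤ e := (hFbnd p hpF).2
        have h2 : q.1 ≤ q.2 := hTchain.1 q hqT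
        have h3 : pvCov (pvArec as_ (pvSkipW bsuf s) []) q.1 := ⟨q, hqT, le_refl _, h2⟩
        have h4 : pvCov as_ q.1 := ((hTcov q.1).mp h3).1
        rcases h4 with ⟨q', hq', h5, h6⟩
        have := halb q' hq'
        omega

-- ---------- B's clipping passes: coverage ----------

theorem pv_clip1_cov (q p : Int × Int) (x : Int) :
    pvCov (pvClip1 q p) x ↔ (p.1 ≤ x ∧ x ≤ p.2 ∧ ¬ (q.1 ≤ x ∧ x ≤ q.2)) := by
  unfold pvClip1
  rw [pv_cov_append]
  by_cases h1 : p.1 ≤ min p.2 (q.1 - 1) <;> by_cases h2 : max p.1 (q.2 + 1) ≤ p.2 <;>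
    simp [h1, h2, pvCov] <;> omega

theorem pv_clip1_ne (q p r : Int × Int) (h : r ∈ pvClip1 q p) : r.1 ≤ r.2 := by
  unfold pvClip1 at h
  rcases List.mem_append.mp h with h1 | h1 <;>
    [by_cases h2 : p.1 ≤ min p.2 (q.1 - 1); by_cases h2 : max p.1 (q.2 + 1) ≤ p.2] <;>
    simp [h2] at h1 <;> rcases h1 with rfl <;> simp <;> omega

theorem pv_cov_flatMap (l : List (Int × Int)) (f : Int × Int → List (Int × Int)) (x : Int) :
    pvCov (l.flatMap f) x ↔ ∃ p ∈ l, pvCov (f p) x := by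
  unfold pvCov
  simp only [List.mem_flatMap]
  constructor
  · rintro ⟨r, ⟨p, hp, hr⟩, h1, h2⟩
    exact ⟨p, hp, r, hr, h1, h2⟩
  · rintro ⟨p, hp, r, hr, h1, h2⟩
    exact ⟨r, ⟨p, hp, hr⟩, h1, h2⟩

theorem pv_clipfold_cov (nb : List (Int × Int)) : ∀ (segs : List (Int × Int)) (x : Int),
    pvCov (nb.foldl (fun segs q => segs.flatMap (pvClip1 q)) segs) x
      ↔ pvCov segs x ∧ ¬ pvCov nb x := by
  induction nb with
  | nil => intro segs x; simp [pvCov]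
  | cons q nb' ih =>
    intro segs x
    rw [List.foldl_cons, ih (segs.flatMap (pvClip1 q)) x, pv_cov_flatMap]
    obtain ⟨qs, qe⟩ := q
    rw [pv_cov_cons]
    constructor
    · rintro ⟨⟨p, hp, hc⟩, h2⟩
      rw [pv_clip1_cov] at hc
      refine ⟨⟨p, hp, hc.1, hc.2.1⟩, ?_⟩
      rintro (h3 | h3)
      · exact hc.2.2 h3
      · exact h2 h3
    · rintro ⟨⟨p, hp, h1, h2⟩, h3⟩
      refine ⟨⟨p, hp, ?_⟩, fun h4 => h3 (Or.inr h4)⟩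
      rw [pv_clip1_cov]
      exact ⟨h1, h2, fun h5 => h3 (Or.inl h5)⟩

theorem pv_clipfold_ne (nb : List (Int × Int)) : ∀ (segs : List (Int × Int)),
    (∀ p ∈ segs, p.1 ≤ p.2) →
    ∀ p ∈ nb.foldl (fun segs q => segs.flatMap (pvClip1 q)) segs, p.1 ≤ p.2 := by
  induction nb with
  | nil => intro segs h p hp; exact h p hp
  | cons q nb' ih =>
    intro segs h p hp
    refine ih (segs.flatMap (pvClip1 q)) ?_ p hp
    intro r hr
    rcases List.mem_flatMap.mp hr with ⟨p', _, hr'⟩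
    exact pv_clip1_ne q p' r hr'

-- ---------- tying it together ----------

theorem pv_pieces_cov (a b : List (Int × Int)) (x : Int) :
    pvCov ((a.flatMap (fun p => pvClipAll (b.map (fun p => (min p.1 p.2, max p.1 p.2)))
        (min p.1 p.2, max p.1 p.2)))) x
      ↔ ((∃ p ∈ a, min p.1 p.2 ≤ x ∧ x ≤ max p.1 p.2)
          ∧ ¬ (∃ p ∈ b, min p.1 p.2 ≤ x ∧ x ≤ max p.1 p.2)) := by
  rw [pv_cov_flatMap]
  have hb : pvCov (b.map (fun p => (min p.1 p.2, max p.1 p.2))) x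
      ↔ ∃ p ∈ b, min p.1 p.2 ≤ x ∧ x ≤ max p.1 p.2 := by
    unfold pvCov
    constructor
    · rintro ⟨r, hr, h1, h2⟩
      rcases List.mem_map.mp hr with ⟨p, hp, rfl⟩
      exact ⟨p, hp, h1, h2⟩
    · rintro ⟨p, hp, h1, h2⟩
      exact ⟨(min p.1 p.2, max p.1 p.2), List.mem_map.mpr ⟨p, hp, rfl⟩, h1, h2⟩
  constructor
  · rintro ⟨p, hp, hc⟩
    unfold pvClipAll at hc
    rw [pv_clipfold_cov] at hc
    rcases hc with ⟨h1, h2⟩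
    rcases (pv_cov_cons _ _ [] x).mp h1 with h3 | h3
    · exact ⟨⟨p, hp, h3⟩, fun h4 => h2 (hb.mpr h4)⟩
    · exact absurd h3 (pv_cov_nil x)
  · rintro ⟨⟨p, hp, h1⟩, h2⟩
    refine ⟨p, hp, ?_⟩
    unfold pvClipAll
    rw [pv_clipfold_cov]
    exact ⟨(pv_cov_cons _ _ [] x).mpr (Or.inl h1), fun h3 => h2 (hb.mp h3)⟩

theorem pv_mapnorm_cov (l : List (Int × Int)) (x : Int) :
    pvCov (l.map (fun p => (min p.1 p.2, max p.1 p.2))) x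
      ↔ ∃ p ∈ l, min p.1 p.2 ≤ x ∧ x ≤ max p.1 p.2 := by
  unfold pvCov
  constructor
  · rintro ⟨r, hr, h1, h2⟩
    rcases List.mem_map.mp hr with ⟨p, hp, rfl⟩
    exact ⟨p, hp, h1, h2⟩
  · rintro ⟨p, hp, h1, h2⟩
    exact ⟨(min p.1 p.2, max p.1 p.2), List.mem_map.mpr ⟨p, hp, rfl⟩, h1, h2⟩

theorem subtract_intervals_eq (a b : List (Int × Int)) :
    subtract_intervals a b = subtract_intervals_alt a b := by
  have hnorm : ∀ l : List (Int × Int),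
      ∀ p ∈ l.map (fun p => (min p.1 p.2, max p.1 p.2)), p.1 ≤ p.2 := by
    intro l p hp
    rcases List.mem_map.mp hp with ⟨q, _, rfl⟩
    exact min_le_max
  have hcma : pvChainI (pvMergeA a) := by
    rw [pv_mergeA_eq_core]; exact pv_mergeCore_chain _ (hnorm a)
  have hcmb : pvChainI (pvMergeA b) := by
    rw [pv_mergeA_eq_core]; exact pv_mergeCore_chain _ (hnorm b)
  obtain ⟨hAcov, hAchain⟩ := pv_arec_main (pvMergeA a) (pvMergeA b) hcma hcmb
  have hpne : ∀ p ∈ (a.flatMap (fun p => pvClipAll (b.map (fun p => (min p.1 p.2, max p.1 p.2)))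
      (min p.1 p.2, max p.1 p.2))), p.1 ≤ p.2 := by
    intro p hp
    rcases List.mem_flatMap.mp hp with ⟨q, _, hq⟩
    unfold pvClipAll at hq
    refine pv_clipfold_ne _ [((min q.1 q.2, max q.1 q.2))] ?_ p hq
    intro r hr
    rcases List.mem_singleton.mp hr with rfl
    simp
  have hA : subtract_intervals a b = pvArec (pvMergeA a) (pvMergeA b) [] := by
    unfold subtract_intervals
    exact pv_foldl_eq_arec (pvMergeA a) (pvMergeA b) []
  have hB : subtract_intervals_alt a b
      = pvMergeCore (a.flatMap (fun p => pvClipAll (b.map (fun p => (min p.1 p.2, max p.1 p.2)))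
          (min p.1 p.2, max p.1 p.2))) := by
    unfold subtract_intervals_alt
    exact pv_mergeEnd_eq_core _
  rw [hA, hB]
  refine pv_chain_unique _ _ hAchain (pv_mergeCore_chain _ hpne) (fun x => ?_)
  rw [hAcov x, pv_mergeCore_cov, pv_pieces_cov]
  have h1 : pvCov (pvMergeA a) x ↔ ∃ p ∈ a, min p.1 p.2 ≤ x ∧ x ≤ max p.1 p.2 := by
    rw [pv_mergeA_eq_core, pv_mergeCore_cov, pv_mapnorm_cov]
  have h2 : pvCov (pvMergeA b) x ↔ ∃ p ∈ b, min p.1 p.2 ≤ x ∧ x ≤ max p.1 p.2 := by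
    rw [pv_mergeA_eq_core, pv_mergeCore_cov, pv_mapnorm_cov]
  rw [h1, h2]

-- ===== VERDICT (by name: the statement is the Claim_ definition above) =====
theorem subtract_intervals_spec : Claim_equal_subtract_intervals := by
  intro a b _
  exact subtract_intervals_eq a b
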